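-- pv_equiv track=rewrite | github.com/alvinwang922/Data-Structures-and-Algorithms | Arrays/Tree-Distribution.py | getSmallestPopulation
-- ===== SOURCE A (Python) =====
-- def getSmallestPopulation(trees):
--     occurrence = dict()
--     tree = trees[0]
--     for i in range(len(trees)):
--         occurrence[trees[i]] = occurrence.get(trees[i], 0) + 1
--     for key in occurrence:
--         if occurrence[tree] == occurrence[key]:
--             tree = min(tree, key)
--         else:
--             if occurrence[tree] > occurrence[key]:
--                 tree = key
--     return tree
-- ===== SOURCE B (Python) =====
-- def getSmallestPopulation(trees):
--     s = sorted(trees)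
--     best = s[0]
--     best_count = None
--     i = 0
--     n = len(s)
--     while i < n:
--         j = i
--         while j < n and s[j] == s[i]:
--             j += 1
--         if best_count is None or j - i < best_count:
--             best_count = j - i
--             best = s[i]
--         i = j
--     return best
-- ===== Notes on version B (the rewrite author's own statement) =====
-- stated objective: alternative
-- what changed: Replaces the occurrence dictionary and the key-scan with argmin updates by sorting a copy and doing one linear scan over maximal runs of equal elements, keeping the first run of strictly smallest length (ascending order makes that the min-value tie-break).
import Mathlib
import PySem

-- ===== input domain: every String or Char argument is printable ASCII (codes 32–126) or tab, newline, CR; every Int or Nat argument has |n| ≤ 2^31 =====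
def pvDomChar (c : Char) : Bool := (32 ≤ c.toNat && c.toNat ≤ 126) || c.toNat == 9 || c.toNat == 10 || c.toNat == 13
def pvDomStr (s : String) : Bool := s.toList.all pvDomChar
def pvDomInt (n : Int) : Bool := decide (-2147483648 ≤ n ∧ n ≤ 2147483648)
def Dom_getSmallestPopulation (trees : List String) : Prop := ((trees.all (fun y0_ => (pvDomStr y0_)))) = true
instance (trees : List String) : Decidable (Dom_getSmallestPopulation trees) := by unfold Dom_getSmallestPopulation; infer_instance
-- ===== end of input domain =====

-- B replaces A's occurrence dictionary + key scan by sort-then-run-scan (alternative algorithm, similar cost); both raise IndexError on [] (excluded by Pre_).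

-- ===== PORT A =====
def getSmallestPopulation (trees : List String) : String :=
  let occurrence : PySem.Dict String Int :=
    (PySem.List.pyRange 0 (PySem.List.len trees) 1).foldl
      (fun d i => d.insert (PySem.List.pyGetD trees i "") (d.getD (PySem.List.pyGetD trees i "") 0 + 1))
      PySem.Dict.empty
  occurrence.keys.foldl
    (fun tree key =>
      if occurrence.getD tree 0 = occurrence.getD key 0 then
        (if key < tree then key else tree)
      else
        if occurrence.getD tree 0 > occurrence.getD key 0 then key else tree)
    (PySem.List.pyGetD trees 0 "")

-- ===== PORT B =====
-- the inner while loop of Source B: length of the leading run of x's, and the rest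
def pvSpanEq (x : String) : List String → Nat × List String
  | [] => (0, [])
  | y :: ys => if y = x then ((pvSpanEq x ys).1 + 1, (pvSpanEq x ys).2) else (0, y :: ys)

theorem pvSpanEq_len (x : String) (l : List String) : (pvSpanEq x l).2.length ≤ l.length := by
  induction l with
  | nil => simp [pvSpanEq]
  | cons y ys ih =>
    by_cases h : y = x
    · simp [pvSpanEq, h]; omega
    · simp [pvSpanEq, h]

-- the outer while loop of Source B
def pvScanRuns (s : List String) (best : String) (bestCount : Option Int) : String :=
  match s with
  | [] => best
  | x :: ys =>
    let p := pvSpanEq x ys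
    let runLen : Int := (p.1 : Int) + 1
    match bestCount with
    | none => pvScanRuns p.2 x (some runLen)
    | some bc => if runLen < bc then pvScanRuns p.2 x (some runLen) else pvScanRuns p.2 best (some bc)
termination_by s.length
decreasing_by
  all_goals (simp only [List.length_cons]; have := pvSpanEq_len x ys; omega)

def getSmallestPopulation_alt (trees : List String) : String :=
  let s := PySem.List.sorted trees (fun z => z) false
  pvScanRuns s (PySem.List.pyGetD s 0 "") none

-- ===== PRECONDITION & SPEC =====
-- Pre_ excludes exactly the empty list, on which A raises IndexError at trees[0].
def Pre_getSmallestPopulation (trees : List String) : Prop := trees ≠ []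
instance (trees : List String) : Decidable (Pre_getSmallestPopulation trees) := by unfold Pre_getSmallestPopulation; infer_instance
def pvWitness_getSmallestPopulation : List String := ["pine", "oak", "pine"]

def Spec_getSmallestPopulation (trees : List String) (out : String) : Prop := out = getSmallestPopulation_alt trees
instance (trees : List String) (out : String) : Decidable (Spec_getSmallestPopulation trees out) := by unfold Spec_getSmallestPopulation; infer_instance

-- ===== CLAIM (what is proved, stated in full; the proofs are below) =====
def Claim_equal_getSmallestPopulation : Prop := ∀ (trees : List String), Dom_getSmallestPopulation trees → Pre_getSmallestPopulation trees → Spec_getSmallestPopulation trees (getSmallestPopulation trees)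

-- ===== LEMMAS AND PROOFS =====

-- strict order "has strictly smaller count, or equal count and smaller value"
abbrev pvLt (c : String → Nat) (y r : String) : Prop := c y < c r ∨ (c y = c r ∧ y < r)

-- A's loop body as a binary min for pvLt
def pvM (c : String → Nat) (b k : String) : String := if pvLt c k b then k else b

theorem pvLt_trans {c : String → Nat} {a b d : String} (h1 : pvLt c a b) (h2 : pvLt c b d) : pvLt c a d := by
  rcases h1 with h1 | ⟨h1, h1'⟩ <;> rcases h2 with h2 | ⟨h2, h2'⟩
  · exact Or.inl (lt_trans h1 h2)
  · exact Or.inl (h2 ▸ h1)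
  · exact Or.inl (h1 ▸ h2)
  · exact Or.inr ⟨h1.trans h2, lt_trans h1' h2'⟩

theorem pvLt_asymm {c : String → Nat} {a b : String} (h : pvLt c a b) : ¬ pvLt c b a := by
  rcases h with h | ⟨h, h'⟩ <;> rintro (g | ⟨g, g'⟩) <;> first
    | omega
    | exact absurd (lt_trans h' g') (lt_irrefl _)

theorem pvLt_eq_or_gt {c : String → Nat} {a b : String} (h : ¬ pvLt c a b) : a = b ∨ pvLt c b a := by
  unfold pvLt at *
  push_neg at h
  rcases lt_trichotomy (c b) (c a) with hc | hc | hc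
  · exact Or.inr (Or.inl hc)
  · rcases lt_trichotomy a b with hs | hs | hs
    · exact absurd hs (h.2 hc.symm)
    · exact Or.inl hs
    · exact Or.inr (Or.inr ⟨hc, hs⟩)
  · omega

theorem pvMin_unique {c : String → Nat} {l : List String} {r1 r2 : String}
    (m1 : r1 ∈ l) (m2 : r2 ∈ l)
    (h1 : ∀ y ∈ l, ¬ pvLt c y r1) (h2 : ∀ y ∈ l, ¬ pvLt c y r2) : r1 = r2 := by
  rcases pvLt_eq_or_gt (h2 r1 m1) with h | h
  · exact h
  · exact absurd h (h1 r2 m2)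

-- the A-side fold computes a pvLt-minimum of b :: l
theorem pvM_foldl_min (c : String → Nat) (l : List String) (b : String) :
    l.foldl (pvM c) b ∈ b :: l ∧ ∀ y ∈ b :: l, ¬ pvLt c y (l.foldl (pvM c) b) := by
  induction l generalizing b with
  | nil => simpa using fun h => pvLt_asymm h h
  | cons x l' ih =>
    have ihb := ih (pvM c b x)
    have hb' : pvM c b x = b ∨ pvM c b x = x := by
      unfold pvM; split_ifs <;> simp
    constructor
    · simp only [List.foldl_cons]
      rcases List.mem_cons.mp ihb.1 with h | h
      · rcases hb' with h' | h' <;> rw [h'] at h ⊢ <;> simp [h]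
      · simp [h]
    · intro y hy
      simp only [List.mem_cons] at hy
      have hmin := ihb.2
      have hres := ihb.1
      -- the result r satisfies ¬ pvLt (pvM c b x) r, hence r = pvM c b x ∨ pvLt r (pvM c b x)
      have hnb' : ¬ pvLt c (pvM c b x) (l'.foldl (pvM c) (pvM c b x)) := hmin _ (by simp)
      have hkey : ∀ z, ¬ pvLt c z (pvM c b x) → ¬ pvLt c z (l'.foldl (pvM c) (pvM c b x)) := by
        intro z hz hcon
        rcases pvLt_eq_or_gt hnb' with he | hg
        · exact hz (he ▸ hcon)
        · exact hz (pvLt_trans hcon hg)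
      rcases hy with rfl | rfl | hy
      · -- y = b
        apply hkey
        unfold pvM; split_ifs with hxb
        · exact pvLt_asymm hxb
        · exact fun h => pvLt_asymm h h
      · -- y = x
        apply hkey
        unfold pvM; split_ifs with hxb
        · exact fun h => pvLt_asymm h h
        · exact hxb
      · exact hmin y (by simp [hy])

-- one-step unfolding equations for B's outer loop
theorem pvScanRuns_cons_some (x : String) (ys : List String) (b : String) (cb : Int) :
    pvScanRuns (x :: ys) b (some cb) =
      if ((pvSpanEq x ys).1 : Int) + 1 < cb then
        pvScanRuns (pvSpanEq x ys).2 x (some (((pvSpanEq x ys).1 : Int) + 1))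
      else pvScanRuns (pvSpanEq x ys).2 b (some cb) := by
  rw [pvScanRuns]

theorem pvScanRuns_cons_none (x : String) (ys : List String) (b : String) :
    pvScanRuns (x :: ys) b none =
      pvScanRuns (pvSpanEq x ys).2 x (some (((pvSpanEq x ys).1 : Int) + 1)) := by
  rw [pvScanRuns]

-- A's loop body equals the binary pvLt-min
theorem pvStep_eq (c' : String → Nat) (b k : String) :
    (if (c' b : Int) = (c' k : Int) then (if k < b then k else b)
     else if (c' b : Int) > (c' k : Int) then k else b) = pvM c' b k := by
  unfold pvM pvLt
  by_cases h1 : c' b = c' k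
  · rw [if_pos (by exact_mod_cast h1)]
    by_cases h2 : k < b
    · rw [if_pos h2, if_pos (Or.inr ⟨h1.symm, h2⟩)]
    · rw [if_neg h2, if_neg (by rintro (hc | ⟨_, hc⟩) <;> first | omega | exact h2 hc)]
  · rw [if_neg (by exact_mod_cast h1)]
    by_cases h3 : c' k < c' b
    · rw [if_pos (by exact_mod_cast h3), if_pos (Or.inl h3)]
    · rw [if_neg (by exact_mod_cast h3),
        if_neg (by rintro (hc | ⟨hc, _⟩) <;> first | exact h3 hc | exact h1 hc.symm)]

-- r ≼ b and b ≺ a give r ≼ a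
theorem pvNotLt_trans {c : String → Nat} {a b r : String}
    (hrb : ¬ pvLt c b r) (hba : pvLt c b a) : ¬ pvLt c a r := by
  intro har
  rcases pvLt_eq_or_gt hrb with rfl | h
  · exact pvLt_asymm hba har
  · exact pvLt_asymm hba (pvLt_trans har h)

-- structure of one maximal run at the head of a sorted list
theorem pvSpanEq_decomp (x : String) (l : List String) :
    l = List.replicate (pvSpanEq x l).1 x ++ (pvSpanEq x l).2 := by
  induction l with
  | nil => simp [pvSpanEq]
  | cons y ys ih =>
    by_cases h : y = x
    · simp [pvSpanEq, h, List.replicate_succ]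
      exact h ▸ ih
    · simp [pvSpanEq, h]

theorem pvSpanEq_sublist (x : String) (l : List String) : (pvSpanEq x l).2.Sublist l := by
  conv_rhs => rw [pvSpanEq_decomp x l]
  exact List.sublist_append_right _ _

theorem pvSpanEq_head_ne (x : String) (l : List String) :
    ∀ y t, (pvSpanEq x l).2 = y :: t → y ≠ x := by
  induction l with
  | nil => simp [pvSpanEq]
  | cons z zs ih =>
    intro y t h
    by_cases hz : z = x
    · simp only [pvSpanEq, if_pos hz] at h
      exact ih y t h
    · simp only [pvSpanEq, if_neg hz] at h
      injection h with h1 _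
      exact h1 ▸ hz

-- facts about the head run of a sorted list whose counts agree with c
theorem pvRun (c : String → Nat) (x : String) (ys : List String)
    (hp : (x :: ys).Pairwise (· ≤ ·))
    (hcnt : ∀ y ∈ x :: ys, (x :: ys).count y = c y) :
    (pvSpanEq x ys).2.Pairwise (· ≤ ·) ∧
    (∀ y ∈ (pvSpanEq x ys).2, x < y) ∧
    (∀ y ∈ (pvSpanEq x ys).2, (pvSpanEq x ys).2.count y = c y) ∧
    c x = (pvSpanEq x ys).1 + 1 ∧
    (∀ y ∈ x :: ys, y = x ∨ y ∈ (pvSpanEq x ys).2) := by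
  set n1 := (pvSpanEq x ys).1 with hn1
  set r := (pvSpanEq x ys).2 with hr
  have hdec : ys = List.replicate n1 x ++ r := pvSpanEq_decomp x ys
  rcases List.pairwise_cons.mp hp with ⟨hxle, hpys⟩
  have hrsub : r.Sublist ys := pvSpanEq_sublist x ys
  have hpr : r.Pairwise (· ≤ ·) := hpys.sublist hrsub
  have hgt : ∀ y ∈ r, x < y := by
    cases hh : r with
    | nil => simp
    | cons y0 t =>
      have hy0ne : y0 ≠ x := pvSpanEq_head_ne x ys y0 t (hr ▸ hh)
      have hy0mem : y0 ∈ ys := hrsub.mem (by simp [hh])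
      have hxy0 : x < y0 := lt_of_le_of_ne (hxle y0 hy0mem) (Ne.symm hy0ne)
      intro y hy
      have hpr' := hpr
      rw [hh] at hpr'
      rcases List.mem_cons.mp hy with rfl | hyt
      · exact hxy0
      · exact lt_of_lt_of_le hxy0 ((List.pairwise_cons.mp hpr').1 y hyt)
  have hxnr : x ∉ r := fun hx => lt_irrefl x (hgt x hx)
  have hmem : ∀ y ∈ x :: ys, y = x ∨ y ∈ r := by
    intro y hy
    rcases List.mem_cons.mp hy with rfl | hy
    · exact Or.inl rfl
    · rw [hdec] at hy
      rcases List.mem_append.mp hy with hy | hy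
      · exact Or.inl (List.eq_of_mem_replicate hy)
      · exact Or.inr hy
  have hcx : c x = n1 + 1 := by
    have := hcnt x (by simp)
    rw [hdec] at this
    simp [List.count_append, List.count_eq_zero_of_not_mem hxnr] at this
    omega
  have hcr : ∀ y ∈ r, r.count y = c y := by
    intro y hy
    have hyx : y ≠ x := fun h => hxnr (h ▸ hy)
    have := hcnt y (by rw [hdec]; simp [hy])
    rw [hdec] at this
    simpa [List.count_cons, List.count_append, List.count_replicate, hyx, Ne.symm hyx] using this
  exact ⟨hpr, hgt, hcr, hcx, hmem⟩

-- B's loop with a current best computes a pvLt-minimum of b :: s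
theorem pvScan_spec (c : String → Nat) : ∀ (n : Nat) (s : List String), s.length ≤ n → ∀ (b : String) (cb : Int),
    s.Pairwise (· ≤ ·) → (∀ y ∈ s, b < y) → (∀ y ∈ s, s.count y = c y) → cb = (c b : Int) →
    pvScanRuns s b (some cb) ∈ b :: s ∧ ∀ y ∈ b :: s, ¬ pvLt c y (pvScanRuns s b (some cb)) := by
  intro n
  induction n with
  | zero =>
    intro s hs b cb _ _ _ _
    have : s = [] := List.eq_nil_of_length_eq_zero (Nat.le_zero.mp hs)
    subst this
    simp only [pvScanRuns]
    exact ⟨by simp, by simpa using fun h => pvLt_asymm h h⟩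
  | succ n ih =>
    intro s hs b cb hp hbl hcnt hcb
    cases s with
    | nil =>
      simp only [pvScanRuns]
      exact ⟨by simp, by simpa using fun h => pvLt_asymm h h⟩
    | cons x ys =>
      obtain ⟨hpr, hgt, hcr, hcx, hmem⟩ := pvRun c x ys hp hcnt
      have hbx : b < x := hbl x (by simp)
      have hgtb : ∀ y ∈ (pvSpanEq x ys).2, b < y := fun y hy => lt_trans hbx (hgt y hy)
      have hlen : (pvSpanEq x ys).2.length ≤ n := by
        have := pvSpanEq_len x ys
        simp only [List.length_cons] at hs
        omega
      have hmem' : ∀ res, res ∈ x :: (pvSpanEq x ys).2 → res ∈ b :: x :: ys := by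
        intro res h
        rcases List.mem_cons.mp h with rfl | h
        · simp
        · simp [(pvSpanEq_sublist x ys).mem h]
      rw [pvScanRuns_cons_some]
      by_cases hlt : ((pvSpanEq x ys).1 : Int) + 1 < cb
      · rw [if_pos hlt]
        obtain ⟨hm, hmin⟩ := ih (pvSpanEq x ys).2 hlen x (((pvSpanEq x ys).1 : Int) + 1)
          hpr hgt hcr (by push_cast [hcx]; ring)
        have hxb : pvLt c x b := by
          left; rw [hcb] at hlt; omega
        constructor
        · exact hmem' _ hm
        · intro y hy
          rcases List.mem_cons.mp hy with rfl | hy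
          · exact pvNotLt_trans (hmin x (by simp)) hxb
          · rcases hmem y hy with rfl | hy'
            · exact hmin y (by simp)
            · exact hmin y (by simp [hy'])
      · rw [if_neg hlt]
        obtain ⟨hm, hmin⟩ := ih (pvSpanEq x ys).2 hlen b cb hpr hgtb hcr hcb
        have hbxlt : pvLt c b x := by
          rw [hcb] at hlt
          rcases Nat.lt_or_ge (c b) (c x) with h | h
          · exact Or.inl h
          · have : c b = c x := by omega
            exact Or.inr ⟨this, hbx⟩
        constructor
        · rcases List.mem_cons.mp hm with h | h
          · simp [h]
          · simp [(pvSpanEq_sublist x ys).mem h]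
        · intro y hy
          rcases List.mem_cons.mp hy with rfl | hy
          · exact hmin y (by simp)
          · rcases hmem y hy with rfl | hy'
            · exact pvNotLt_trans (hmin b (by simp)) hbxlt
            · exact hmin y (by simp [hy'])

-- entry point of B's loop: first run always replaces the initial best
theorem pvScanEntry (c : String → Nat) (x : String) (ys : List String)
    (hp : (x :: ys).Pairwise (· ≤ ·))
    (hcnt : ∀ y ∈ x :: ys, (x :: ys).count y = c y) :
    pvScanRuns (x :: ys) x none ∈ x :: ys ∧
    ∀ y ∈ x :: ys, ¬ pvLt c y (pvScanRuns (x :: ys) x none) := by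
  obtain ⟨hpr, hgt, hcr, hcx, hmem⟩ := pvRun c x ys hp hcnt
  rw [pvScanRuns_cons_none]
  obtain ⟨hm, hmin⟩ := pvScan_spec c (pvSpanEq x ys).2.length (pvSpanEq x ys).2 le_rfl
    x (((pvSpanEq x ys).1 : Int) + 1) hpr hgt hcr (by push_cast [hcx]; ring)
  have hmem' : ∀ res, res ∈ x :: (pvSpanEq x ys).2 → res ∈ x :: ys := by
    intro res h
    rcases List.mem_cons.mp h with rfl | h
    · simp
    · simp [(pvSpanEq_sublist x ys).mem h]
  refine ⟨hmem' _ hm, ?_⟩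
  intro y hy
  rcases hmem y hy with rfl | hy'
  · exact hmin y (by simp)
  · exact hmin y (by simp [hy'])

-- A computes a pvLt-minimum of trees
theorem pvA_min (trees : List String) (h : trees ≠ []) :
    getSmallestPopulation trees ∈ trees ∧
    ∀ y ∈ trees, ¬ pvLt (fun k => trees.count k) y (getSmallestPopulation trees) := by
  obtain ⟨t, ts, rfl⟩ := List.exists_cons_of_ne_nil h
  have hA : getSmallestPopulation (t :: ts) =
      (PySem.Set.ofList (t :: ts)).foldl (pvM (fun k => (t :: ts).count k)) t := by
    simp only [getSmallestPopulation]
    rw [PySem.List.foldl_pyRange_pyGetD (t :: ts) ""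
      (fun (d : PySem.Dict String Int) x => d.insert x (d.getD x 0 + 1)) PySem.Dict.empty (by norm_num)]
    simp only [Int.toNat_zero, List.drop_zero,
      PySem.Dict.foldl_insert_getD_add_one_eq_counter, PySem.Dict.keys_counter,
      PySem.List.pyGetD_zero_cons]
    apply PySem.List.foldl_congr_mem
    intro acc k _
    simp only [PySem.Dict.getD_counter]
    exact pvStep_eq (fun z => List.count z (t :: ts)) acc k
  rw [hA]
  obtain ⟨hm, hmin⟩ := pvM_foldl_min (fun k => (t :: ts).count k) (PySem.Set.ofList (t :: ts)) t
  constructor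
  · rcases List.mem_cons.mp hm with h' | h'
    · simp [h']
    · exact (PySem.Set.mem_ofList _ _).mp h'
  · intro y hy
    exact hmin y (by simp [(PySem.Set.mem_ofList _ _), hy])

-- B computes a pvLt-minimum of trees
theorem pvB_min (trees : List String) (h : trees ≠ []) :
    getSmallestPopulation_alt trees ∈ trees ∧
    ∀ y ∈ trees, ¬ pvLt (fun k => trees.count k) y (getSmallestPopulation_alt trees) := by
  have hperm : (PySem.List.sorted trees (fun z => z) false).Perm trees := PySem.List.sorted_perm trees _ _
  have hne : PySem.List.sorted trees (fun z => z) false ≠ [] := by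
    intro hc
    exact h ((PySem.List.sorted_eq_nil_iff trees (fun z => z) false).mp hc)
  obtain ⟨x, ys, hxy⟩ := List.exists_cons_of_ne_nil hne
  have hp : (x :: ys).Pairwise (· ≤ ·) := by
    have := PySem.List.sorted_pairwise trees (fun z => z)
    rw [hxy] at this
    exact this
  have hcnt : ∀ y ∈ x :: ys, (x :: ys).count y = trees.count y := by
    intro y _
    rw [← hxy]
    exact hperm.count_eq y
  have hB : getSmallestPopulation_alt trees = pvScanRuns (x :: ys) x none := by
    simp only [getSmallestPopulation_alt]
    rw [hxy, PySem.List.pyGetD_zero_cons]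
  obtain ⟨hm, hmin⟩ := pvScanEntry (fun k => trees.count k) x ys hp hcnt
  rw [hB]
  have hmemS : ∀ z, z ∈ x :: ys ↔ z ∈ trees := by
    intro z; rw [← hxy]; exact hperm.mem_iff
  exact ⟨(hmemS _).mp hm, fun y hy => hmin y ((hmemS y).mpr hy)⟩

-- ===== VERDICT (by name: the statement is the Claim_ definition above) =====
theorem getSmallestPopulation_spec : Claim_equal_getSmallestPopulation := by
  intro trees _ hpre
  unfold Spec_getSmallestPopulation
  obtain ⟨hmA, hminA⟩ := pvA_min trees hpre
  obtain ⟨hmB, hminB⟩ := pvB_min trees hpre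
  exact pvMin_unique hmA hmB hminA hminB
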